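-- pv_equiv track=rewrite | github.com/jonwright13/lottery-number-generator | src/threshold_criteria.py | analyze_gap_distribution
-- ===== SOURCE A (Python) =====
-- from collections import Counter
--
-- def analyze_gap_distribution(lottery_numbers, count_main=5, count_lucky=2):
--     """
--     Analyze gaps (differences) between consecutive numbers for main and lucky numbers across historical draws.
--     Return gap counters for main and lucky numbers.
--
--     Args:
--         lottery_numbers: List of tuples/lists where each draw has main numbers + lucky numbers.
--         count_main: Number of main numbers to consider (default 5).
--         count_lucky: Number of lucky numbers to consider (default 2).
--
--     Returns:
--         dict with structure:
--         {
--             'main': {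
--                 'gap_counters': [Counter(), Counter(), ..., Counter()]  # One per gap position
--             },
--             'lucky': {
--                 'gap_counters': [Counter(), ...]  # Similar for lucky numbers
--             }
--         }
--     """
--
--     main_gap_counters = [Counter() for _ in range(count_main - 1)]
--     lucky_gap_counters = (
--         [Counter() for _ in range(count_lucky - 1)] if count_lucky > 1 else []
--     )
--
--     for draw in lottery_numbers:
--         # Assume draw is like (M1, M2, M3, M4, M5, L1, L2) all zero-padded strings
--         main_nums = sorted(int(n) for n in draw[:count_main])
--         lucky_nums = sorted(
--             int(n) for n in draw[count_main : count_main + count_lucky]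
--         )
--
--         # Calculate gaps for main numbers
--         for i in range(len(main_nums) - 1):
--             gap = main_nums[i + 1] - main_nums[i]
--             main_gap_counters[i][gap] += 1
--
--         # Calculate gaps for lucky numbers if applicable
--         for i in range(len(lucky_nums) - 1):
--             gap = lucky_nums[i + 1] - lucky_nums[i]
--             lucky_gap_counters[i][gap] += 1
--
--     return {
--         "main": {"gap_counters": main_gap_counters},
--         "lucky": {"gap_counters": lucky_gap_counters},
--     }
-- ===== SOURCE B (Python) =====
-- from collections import Counter
--
--
-- def analyze_gap_distribution(lottery_numbers, count_main=5, count_lucky=2):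
--     # Gather: one gap row per draw, for main and lucky numbers.
--     main_rows = []
--     lucky_rows = []
--     for draw in lottery_numbers:
--         m = sorted(int(n) for n in draw[:count_main])
--         l = sorted(int(n) for n in draw[count_main : count_main + count_lucky])
--         main_rows.append([b - a for a, b in zip(m, m[1:])])
--         lucky_rows.append([b - a for a, b in zip(l, l[1:])])
--
--     # Tabulate: build each position's Counter column-wise.
--     def tabulate(rows, n):
--         return [Counter(r[i] for r in rows if i < len(r)) for i in range(n)]
--
--     return {
--         "main": {"gap_counters": tabulate(main_rows, count_main - 1)},
--         "lucky": {
--             "gap_counters": (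
--                 tabulate(lucky_rows, count_lucky - 1) if count_lucky > 1 else []
--             )
--         },
--     }
-- ===== Notes on version B (the rewrite author's own statement) =====
-- stated objective: alternative
-- what changed: A increments per-position Counters in place inside the draw loop; B first gathers one gap row per draw and then, in a separate pass, tabulates each position's Counter column-wise from the collected rows.
import Mathlib
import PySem

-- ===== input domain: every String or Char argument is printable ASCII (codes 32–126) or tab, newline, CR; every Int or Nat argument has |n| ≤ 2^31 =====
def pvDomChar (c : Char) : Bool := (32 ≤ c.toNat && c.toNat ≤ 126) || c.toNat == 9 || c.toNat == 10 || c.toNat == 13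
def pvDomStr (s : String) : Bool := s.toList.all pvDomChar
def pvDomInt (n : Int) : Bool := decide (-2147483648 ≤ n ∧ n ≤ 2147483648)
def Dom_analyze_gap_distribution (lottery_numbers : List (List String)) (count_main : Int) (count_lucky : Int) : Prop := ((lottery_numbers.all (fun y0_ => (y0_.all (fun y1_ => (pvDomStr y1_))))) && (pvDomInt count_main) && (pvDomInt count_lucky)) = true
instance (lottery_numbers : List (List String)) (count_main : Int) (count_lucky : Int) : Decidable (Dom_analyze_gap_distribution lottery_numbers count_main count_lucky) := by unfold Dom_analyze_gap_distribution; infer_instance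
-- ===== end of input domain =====

-- B replaces A's inline per-draw counter increments by a gather-then-tabulate decomposition
-- (collect one gap row per draw, then build each position's Counter column-wise); objective: alternative.


-- ===== PORT A =====
-- int(n); the 0 default is only reached where Python raises ValueError (excluded by Pre_)
def pvInt (s : String) : Int := (PySem.Int.ofStr? s).getD 0

-- sorted(int(n) for n in draw[:count_main])
def pvMainNums (count_main : Int) (draw : List String) : List Int :=
  PySem.List.sorted ((PySem.List.slice draw none (some count_main)).map pvInt) (fun x => x) false

-- sorted(int(n) for n in draw[count_main : count_main + count_lucky])
def pvLuckyNums (count_main count_lucky : Int) (draw : List String) : List Int :=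
  PySem.List.sorted ((PySem.List.slice draw (some count_main) (some (count_main + count_lucky))).map pvInt) (fun x => x) false

-- gap = nums[i + 1] - nums[i]
def pvGap (nums : List Int) (i : Nat) : Int :=
  PySem.List.pyGetD nums ((i : Int) + 1) 0 - PySem.List.pyGetD nums (i : Int) 0

-- 'for i in range(len(nums) - 1): counters[i][gap] += 1' (list index out of range is outside Pre_)
def pvAddGaps (cs : List (PySem.Dict Int Int)) (nums : List Int) : List (PySem.Dict Int Int) :=
  (List.range (nums.length - 1)).foldl
    (fun cs i => cs.modify i (fun d => d.modify (pvGap nums i) 0 (· + 1))) cs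

def analyze_gap_distribution (lottery_numbers : List (List String)) (count_main : Int) (count_lucky : Int) : List (String × List (String × List (List (Int × Int)))) :=
  let mainInit : List (PySem.Dict Int Int) := List.replicate (count_main - 1).toNat PySem.Dict.empty
  let luckyInit : List (PySem.Dict Int Int) :=
    if 1 < count_lucky then List.replicate (count_lucky - 1).toNat PySem.Dict.empty else []
  let st := lottery_numbers.foldl
    (fun (st : List (PySem.Dict Int Int) × List (PySem.Dict Int Int)) draw =>
      (pvAddGaps st.1 (pvMainNums count_main draw),
       pvAddGaps st.2 (pvLuckyNums count_main count_lucky draw)))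
    (mainInit, luckyInit)
  [("main", [("gap_counters", st.1.map (fun d => d.items))]),
   ("lucky", [("gap_counters", st.2.map (fun d => d.items))])]

-- ===== PORT B =====
-- [b - a for a, b in zip(nums, nums[1:])]
def pvGapRow (nums : List Int) : List Int :=
  (nums.zip (PySem.List.slice nums (some 1) none)).map (fun p => p.2 - p.1)

-- [Counter(r[i] for r in rows if i < len(r)) for i in range(n)]
def pvTab (rows : List (List Int)) (n : Int) : List (PySem.Dict Int Int) :=
  (List.range n.toNat).map (fun (i : Nat) =>
    PySem.Dict.counter ((rows.filter (fun r => decide (i < r.length))).map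
      (fun r => PySem.List.pyGetD r ((i : Nat) : Int) 0)))

def analyze_gap_distribution_alt (lottery_numbers : List (List String)) (count_main : Int) (count_lucky : Int) : List (String × List (String × List (List (Int × Int)))) :=
  let main_rows := lottery_numbers.map (fun draw => pvGapRow (pvMainNums count_main draw))
  let lucky_rows := lottery_numbers.map (fun draw => pvGapRow (pvLuckyNums count_main count_lucky draw))
  [("main", [("gap_counters", (pvTab main_rows (count_main - 1)).map (fun d => d.items))]),
   ("lucky", [("gap_counters",
      ((if 1 < count_lucky then pvTab lucky_rows (count_lucky - 1) else []).map (fun d => d.items)))])]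

-- ===== PRECONDITION & SPEC =====
-- Pre_ = exactly the inputs where Python A returns: every sliced string parses as int (else ValueError),
-- and no draw yields more gaps than there are counters (else IndexError, reachable only for negative counts).
def Pre_analyze_gap_distribution (lottery_numbers : List (List String)) (count_main : Int) (count_lucky : Int) : Prop :=
  ∀ draw ∈ lottery_numbers,
    (PySem.List.slice draw none (some count_main)).all (fun s => (PySem.Int.ofStr? s).isSome) ∧
    (PySem.List.slice draw (some count_main) (some (count_main + count_lucky))).all (fun s => (PySem.Int.ofStr? s).isSome) ∧
    (PySem.List.slice draw none (some count_main)).length ≤ (count_main - 1).toNat + 1 ∧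
    (PySem.List.slice draw (some count_main) (some (count_main + count_lucky))).length ≤ (if 1 < count_lucky then (count_lucky - 1).toNat else 0) + 1
instance (lottery_numbers : List (List String)) (count_main : Int) (count_lucky : Int) : Decidable (Pre_analyze_gap_distribution lottery_numbers count_main count_lucky) := by unfold Pre_analyze_gap_distribution; infer_instance

def pvWitness_analyze_gap_distribution : List (List String) × Int × Int :=
  ([["3", "1", "2", "10", "7", "5", "6"], ["8", "2", "4", "1", "9", "6", "3"]], 5, 2)

def Spec_analyze_gap_distribution (lottery_numbers : List (List String)) (count_main : Int) (count_lucky : Int) (out : List (String × List (String × List (List (Int × Int))))) : Prop := out = analyze_gap_distribution_alt lottery_numbers count_main count_lucky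
instance (lottery_numbers : List (List String)) (count_main : Int) (count_lucky : Int) (out : List (String × List (String × List (List (Int × Int))))) : Decidable (Spec_analyze_gap_distribution lottery_numbers count_main count_lucky out) := by
  unfold Spec_analyze_gap_distribution
  haveI i1 : DecidableEq (List (List (Int × Int))) := inferInstance
  haveI i2 : DecidableEq (String × List (List (Int × Int))) := inferInstance
  haveI i3 : DecidableEq (List (String × List (List (Int × Int)))) := inferInstance
  haveI i4 : DecidableEq (String × List (String × List (List (Int × Int)))) := inferInstance
  infer_instance

-- ===== CLAIM (what is proved, stated in full; the proofs are below) =====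
def Claim_equal_analyze_gap_distribution : Prop := ∀ (lottery_numbers : List (List String)) (count_main : Int) (count_lucky : Int), Dom_analyze_gap_distribution lottery_numbers count_main count_lucky → Pre_analyze_gap_distribution lottery_numbers count_main count_lucky → Spec_analyze_gap_distribution lottery_numbers count_main count_lucky (analyze_gap_distribution lottery_numbers count_main count_lucky)

-- ===== LEMMAS AND PROOFS =====

-- A's inner loop 'for i in range(n): cs[i] = f i cs[i]' touches each position at most once
theorem pv_modrange_getElem? {α : Type} (f : Nat → α → α) (n : Nat) (cs : List α) (j : Nat) :
    ((List.range n).foldl (fun cs i => cs.modify i (f i)) cs)[j]?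
      = if j < n then cs[j]?.map (f j) else cs[j]? := by
  induction n with
  | zero => simp
  | succ n ih =>
    rw [List.range_succ, List.foldl_append]
    simp only [List.foldl_cons, List.foldl_nil]
    rw [List.getElem?_modify]
    rcases lt_trichotomy j n with h | h | h
    · have h1 : j < n + 1 := by omega
      have h2 : n ≠ j := by omega
      simp [ih, h, h1, h2]
    · subst h
      simp [ih]
    · have h1 : ¬ j < n := by omega
      have h2 : ¬ j < n + 1 := by omega
      have h3 : n ≠ j := by omega
      simp [ih, h1, h2]
      cases cs[j]? <;> simp [h3]

-- A's inner loop preserves the counter-list length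
theorem pv_modrange_length {α : Type} (f : Nat → α → α) (n : Nat) (cs : List α) :
    ((List.range n).foldl (fun cs i => cs.modify i (f i)) cs).length = cs.length := by
  induction n with
  | zero => rfl
  | succ n ih => rw [List.range_succ, List.foldl_append]; simp [ih]

theorem pv_gapRow_length (nums : List Int) : (pvGapRow nums).length = nums.length - 1 := by
  rw [pvGapRow, PySem.List.slice_from_one]
  simp [List.length_tail]

-- the gap A computes at position j is entry j of B's gap row
theorem pv_gap_eq (nums : List Int) (j : Nat) (h : j < (pvGapRow nums).length) :
    pvGap nums j = PySem.List.pyGetD (pvGapRow nums) ((j : Int)) 0 := by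
  have hlen := pv_gapRow_length nums
  have hj1 : j + 1 < nums.length := by omega
  have hj0 : j < nums.length := by omega
  rw [PySem.List.pyGetD_natCast, pvGap]
  have hc : ((j : Int) + 1) = ((j + 1 : Nat) : Int) := by push_cast; ring
  rw [hc, PySem.List.pyGetD_natCast, PySem.List.pyGetD_natCast]
  rw [List.getD_eq_getElem _ _ h, List.getD_eq_getElem _ _ hj0, List.getD_eq_getElem _ _ hj1]
  simp only [pvGapRow, PySem.List.slice_from_one, List.getElem_map, List.getElem_zip]
  rw [List.getElem_tail]

-- one draw of A's loop, observed at counter position j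
theorem pv_addGaps_getElem? (cs : List (PySem.Dict Int Int)) (nums : List Int) (j : Nat) :
    (pvAddGaps cs nums)[j]?
      = if j < (pvGapRow nums).length
        then cs[j]?.map (fun d => d.modify (PySem.List.pyGetD (pvGapRow nums) ((j : Int)) 0) 0 (· + 1))
        else cs[j]? := by
  rw [pvAddGaps, pv_modrange_getElem?, ← pv_gapRow_length]
  split_ifs with h
  · rw [pv_gap_eq _ _ h]
  · rfl

-- A's whole loop, observed at counter position j, is a plain counting fold over B's column j
theorem pv_foldl_addGaps_getElem? (numsOf : List String → List Int)
    (draws : List (List String)) (cs : List (PySem.Dict Int Int)) (j : Nat) :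
    (draws.foldl (fun cs d => pvAddGaps cs (numsOf d)) cs)[j]?
      = cs[j]?.map (fun c =>
          (((draws.map (fun d => pvGapRow (numsOf d))).filter (fun r => decide (j < r.length))).map
            (fun r => PySem.List.pyGetD r ((j : Int)) 0)).foldl
            (fun dict g => dict.modify g 0 (· + 1)) c) := by
  induction draws generalizing cs with
  | nil => simp
  | cons d t ih =>
    simp only [List.foldl_cons]
    rw [ih, pv_addGaps_getElem?]
    by_cases h : j < (pvGapRow (numsOf d)).length
    · rw [if_pos h]
      simp only [List.map_cons, List.filter_cons, decide_eq_true h, if_true, List.foldl_cons]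
      cases cs[j]? <;> rfl
    · simp [h]

-- A's fold from fresh counters equals B's tabulation (used for the main and the lucky block)
theorem pv_fold_eq_tab (numsOf : List String → List Int) (draws : List (List String)) (m : Int) :
    draws.foldl (fun cs d => pvAddGaps cs (numsOf d))
        (List.replicate m.toNat (PySem.Dict.empty : PySem.Dict Int Int))
      = pvTab (draws.map (fun d => pvGapRow (numsOf d))) m := by
  apply List.ext_getElem?
  intro j
  rw [pv_foldl_addGaps_getElem?, pvTab, List.getElem?_map, List.getElem?_replicate]
  by_cases h : j < m.toNat
  · rw [List.getElem?_range h]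
    simp only [h, if_pos, Option.map_some]
    rw [PySem.Dict.counter_eq_foldl]
  · rw [List.getElem?_eq_none (by simpa using h)]
    simp [h]

-- with no counters (count ≤ 1) A's loop keeps the empty list
theorem pv_foldl_addGaps_nil (numsOf : List String → List Int) (draws : List (List String)) :
    draws.foldl (fun cs d => pvAddGaps cs (numsOf d)) ([] : List (PySem.Dict Int Int)) = [] := by
  induction draws with
  | nil => rfl
  | cons d t ih =>
    have : pvAddGaps ([] : List (PySem.Dict Int Int)) (numsOf d) = [] := by
      have h := pv_modrange_length (fun i d' => d'.modify (pvGap (numsOf d) i) 0 (· + 1))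
        ((numsOf d).length - 1) ([] : List (PySem.Dict Int Int))
      rw [pvAddGaps]
      exact List.length_eq_zero_iff.mp h
    simpa [this] using ih

-- ===== VERDICT (by name: the statement is the Claim_ definition above) =====
theorem analyze_gap_distribution_spec : Claim_equal_analyze_gap_distribution := by
  intro L cm cl _ _
  unfold Spec_analyze_gap_distribution
  simp only [analyze_gap_distribution, analyze_gap_distribution_alt]
  rw [PySem.List.foldl_prod_mk (f := fun cs draw => pvAddGaps cs (pvMainNums cm draw))
        (g := fun cs draw => pvAddGaps cs (pvLuckyNums cm cl draw))]
  rw [pv_fold_eq_tab]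
  by_cases hcl : 1 < cl
  · simp only [hcl, if_pos]
    rw [pv_fold_eq_tab]
  · simp only [hcl, if_neg, not_false_eq_true]
    rw [pv_foldl_addGaps_nil]
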